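-- pv_equiv track=rewrite | github.com/akrivka/gw | gw/cli.py | _classify_checks
-- ===== SOURCE A (Python) =====
-- def _classify_checks(conclusions: list[str | None], states: list[str | None]) -> tuple[int, int, str | None]:
--     total = len(conclusions)
--     passed = 0
--     failed = False
--     pending = False
--     for conclusion, state in zip(conclusions, states):
--         if state and state != "COMPLETED":
--             pending = True
--         if conclusion is None:
--             pending = True
--             continue
--         if conclusion == "SUCCESS":
--             passed += 1
--         elif conclusion in {"NEUTRAL", "SKIPPED"}:
--             passed += 1
--         else:
--             failed = True
--     status = None
--     if total == 0:
--         status = None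
--     elif failed:
--         status = "fail"
--     elif pending:
--         status = "pend"
--     else:
--         status = "ok"
--     return passed, total, status
-- ===== SOURCE B (Python) =====
-- _PASS = frozenset({"SUCCESS", "NEUTRAL", "SKIPPED"})
--
-- def _severity(conclusion, state):
--     # severity lattice: 2 = failing check, 1 = pending check, 0 = passed/clean
--     if conclusion is not None and conclusion not in _PASS:
--         return 2
--     if conclusion is None or (state and state != "COMPLETED"):
--         return 1
--     return 0
--
-- def _classify_checks(conclusions, states):
--     total = len(conclusions)
--     # map over both lists (truncates to the shorter, like zip) and take the worst severity
--     worst = max(map(_severity, conclusions, states), default=0)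
--     passed = sum(1 for c in conclusions[:len(states)] if c in _PASS)
--     status = None if total == 0 else ("ok", "pend", "fail")[worst]
--     return passed, total, status
-- ===== Notes on version B (the rewrite author's own statement) =====
-- stated objective: alternative
-- what changed: Replaces A's fused loop with two mutable boolean flags and a branch ladder by a severity lattice: each (conclusion, state) pair is mapped to a severity 0/1/2, the status is a tuple lookup indexed by the max severity, and passed is a count over the sliced conclusions list.
import Mathlib
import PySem

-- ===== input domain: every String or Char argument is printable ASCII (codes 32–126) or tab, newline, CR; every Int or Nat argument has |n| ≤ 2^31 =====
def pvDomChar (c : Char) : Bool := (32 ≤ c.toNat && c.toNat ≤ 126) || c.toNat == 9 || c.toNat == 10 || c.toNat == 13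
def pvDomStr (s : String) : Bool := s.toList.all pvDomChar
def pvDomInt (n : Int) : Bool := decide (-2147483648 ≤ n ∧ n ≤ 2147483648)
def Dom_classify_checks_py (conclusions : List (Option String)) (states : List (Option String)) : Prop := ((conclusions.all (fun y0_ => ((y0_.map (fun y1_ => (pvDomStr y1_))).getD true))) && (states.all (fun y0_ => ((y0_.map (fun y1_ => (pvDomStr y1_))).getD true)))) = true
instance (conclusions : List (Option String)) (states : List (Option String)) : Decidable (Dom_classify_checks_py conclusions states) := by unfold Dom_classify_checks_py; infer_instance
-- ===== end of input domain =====

-- B replaces A's fused loop with two boolean flags and a branch ladder by a severity lattice: per-pair severity 0/1/2, status = table lookup at the max severity, passed = count over the sliced list; objective: alternative.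


-- ===== PORT A =====
-- 'state and state != "COMPLETED"': a None or empty-string state is falsy
def pvPendState (st : Option String) : Bool :=
  match st with
  | none => false
  | some s => s != "" && s != "COMPLETED"

-- one loop iteration of A: accumulator is (passed, failed, pending); 'continue' = return early
def pvStepA (acc : Int × Bool × Bool) (p : Option String × Option String) : Int × Bool × Bool :=
  let passed := acc.1
  let failed := acc.2.1
  let pending := if pvPendState p.2 then true else acc.2.2
  match p.1 with
  | none => (passed, failed, true)
  | some c =>
    if c = "SUCCESS" then (passed + 1, failed, pending)
    else if c = "NEUTRAL" ∨ c = "SKIPPED" then (passed + 1, failed, pending)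
    else (passed, true, pending)

def classify_checks_py (conclusions : List (Option String)) (states : List (Option String)) : Int × Int × Option String :=
  let total : Int := conclusions.length
  let r := (conclusions.zip states).foldl pvStepA (0, false, false)
  let status : Option String :=
    if total = 0 then none
    else if r.2.1 then some "fail"
    else if r.2.2 then some "pend"
    else some "ok"
  (r.1, total, status)

-- ===== PORT B =====
-- c in _PASS
def pvPassB (c : Option String) : Bool :=
  c == some "SUCCESS" || c == some "NEUTRAL" || c == some "SKIPPED"

-- _severity(conclusion, state): 2 = failing, 1 = pending, 0 = passed/clean
def pvSeverity (p : Option String × Option String) : Nat :=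
  if p.1.isSome && !pvPassB p.1 then 2
  else if p.1 == none || pvPendState p.2 then 1
  else 0

def classify_checks_py_alt (conclusions : List (Option String)) (states : List (Option String)) : Int × Int × Option String :=
  let total : Int := conclusions.length
  -- max(map(_severity, conclusions, states), default=0): two-iterable map = zip, max with default = fold from 0
  let worst : Nat := ((conclusions.zip states).map pvSeverity).foldl max 0
  -- conclusions[:len(states)]: slice with a nonnegative upper bound = take (exact here)
  let passed : Int := (conclusions.take states.length).countP pvPassB
  -- ("ok","pend","fail")[worst]; worst is always ≤ 2 so the tuple index never raises
  let status : Option String :=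
    if total = 0 then none else PySem.List.pyGet? ["ok", "pend", "fail"] (worst : Int)
  (passed, total, status)

-- ===== PRECONDITION & SPEC =====
def Spec_classify_checks_py (conclusions : List (Option String)) (states : List (Option String)) (out : Int × Int × Option String) : Prop := out = classify_checks_py_alt conclusions states
instance (conclusions : List (Option String)) (states : List (Option String)) (out : Int × Int × Option String) : Decidable (Spec_classify_checks_py conclusions states out) := by unfold Spec_classify_checks_py; infer_instance

-- ===== CLAIM (what is proved, stated in full; the proofs are below) =====
def Claim_equal_classify_checks_py : Prop := ∀ (conclusions : List (Option String)) (states : List (Option String)), Dom_classify_checks_py conclusions states → Spec_classify_checks_py conclusions states (classify_checks_py conclusions states)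

-- ===== LEMMAS AND PROOFS =====
-- A's step in closed form
theorem pvStepA_eq (acc : Int × Bool × Bool) (p : Option String × Option String) :
    pvStepA acc p =
      (acc.1 + (if pvPassB p.1 then 1 else 0),
       acc.2.1 || (p.1.isSome && !pvPassB p.1),
       acc.2.2 || (p.1 == none || pvPendState p.2)) := by
  obtain ⟨c, st⟩ := p
  cases c with
  | none =>
    simp [pvStepA, pvPassB]
  | some s =>
    by_cases h1 : s = "SUCCESS"
    · simp [pvStepA, pvPassB, h1]
      cases pvPendState st <;> simp
    · by_cases h2 : s = "NEUTRAL" ∨ s = "SKIPPED"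
      · simp [pvStepA, pvPassB, h1, h2]
        rcases h2 with h2 | h2 <;> simp [h2] <;> (cases pvPendState st <;> simp)
      · rw [not_or] at h2
        simp [pvStepA, pvPassB, h1, h2.1, h2.2]
        cases pvPendState st <;> simp

-- A's fold in closed form
theorem pvFoldA_eq (l : List (Option String × Option String)) (acc : Int × Bool × Bool) :
    l.foldl pvStepA acc =
      (acc.1 + (l.countP (fun p => pvPassB p.1) : Int),
       acc.2.1 || l.any (fun p => p.1.isSome && !pvPassB p.1),
       acc.2.2 || l.any (fun p => p.1 == none || pvPendState p.2)) := by
  induction l generalizing acc with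
  | nil => simp
  | cons hd tl ih =>
    rw [List.foldl_cons, ih, pvStepA_eq]
    refine Prod.ext ?_ (Prod.ext ?_ ?_)
    · simp [List.countP_cons]
      split_ifs <;> omega
    · simp [List.any_cons, Bool.or_assoc]
    · simp [List.any_cons, Bool.or_assoc]

-- the per-pair severity rewritten through A's two predicates
theorem pvSeverity_eq (p : Option String × Option String) :
    pvSeverity p =
      (if p.1.isSome && !pvPassB p.1 then 2
       else if p.1 == none || pvPendState p.2 then 1 else 0) := rfl

-- B's max-fold in closed form (generalized accumulator)
theorem pvWorst_acc (l : List (Option String × Option String)) (a : Nat) :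
    (l.map pvSeverity).foldl max a =
      max a (if l.any (fun p => p.1.isSome && !pvPassB p.1) then 2
             else if l.any (fun p => p.1 == none || pvPendState p.2) then 1 else 0) := by
  induction l generalizing a with
  | nil => simp
  | cons hd tl ih =>
    rw [List.map_cons, List.foldl_cons, ih]
    simp only [List.any_cons, pvSeverity_eq]
    by_cases h1 : (hd.1.isSome && !pvPassB hd.1) = true <;>
      by_cases h2 : (hd.1 == none || pvPendState hd.2) = true <;>
        by_cases h3 : (tl.any fun p => p.1.isSome && !pvPassB p.1) = true <;>
          by_cases h4 : (tl.any fun p => p.1 == none || pvPendState p.2) = true <;>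
            simp [h1, h2, h3, h4, Nat.max_def] <;> split_ifs <;> first
              | omega
              | (simp_all
                 all_goals
                   (exfalso
                    obtain ⟨x, y, hm, hxy⟩ := ‹∃ a b, (a, b) ∈ tl ∧ (a = none ∨ pvPendState b = true)›
                    rcases hxy with h | h
                    · exact (h4 x y hm).1 h
                    · exact absurd h (by simp [(h4 x y hm).2])))

-- passed over the zip equals passed over the truncated first list
theorem pvCount_take (l1 l2 : List (Option String)) :
    ((l1.zip l2).countP (fun p => pvPassB p.1)) = (l1.take l2.length).countP pvPassB := by
  induction l1 generalizing l2 with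
  | nil => simp
  | cons h t ih =>
    cases l2 with
    | nil => simp
    | cons h2 t2 => simp [List.countP_cons, ih]

-- ===== VERDICT (by name: the statement is the Claim_ definition above) =====
theorem classify_checks_py_spec : Claim_equal_classify_checks_py := by
  intro conclusions states _
  unfold Spec_classify_checks_py classify_checks_py classify_checks_py_alt
  simp only [pvFoldA_eq, pvWorst_acc, Int.zero_add, Bool.false_or, Nat.zero_max, pvCount_take]
  split_ifs <;> simp_all [PySem.List.pyGet?, PySem.List.pyIdx?]
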